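-- pv_equiv track=rewrite | github.com/gotlibsh/aoc2023 | solution/26.py | find_col_reflection
-- ===== SOURCE A (Python) =====
-- from itertools import pairwise
--
-- def transpose(note):
--     return [''.join(col) for col in zip(*note, strict=True)]
--
-- def find_col_reflection(note, skip=0):
--     note_cols = transpose(note)
--
--     for i, (c1, c2) in enumerate(pairwise(note_cols)):
--         if skip == i+1:
--             continue
--
--         if c1 == c2:
--             left = reversed(note_cols[:i])
--             right = note_cols[i+2:]
--
--             if all (ci == cj for ci, cj in zip(left, right)):
--                 return i + 1
--
--     return 0
-- ===== SOURCE B (Python) =====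
-- def find_col_reflection(note, skip=0):
--     w = len(note[0]) if note else 0
--     for p in range(1, w):
--         if p == skip:
--             continue
--         m = min(p, w - p)
--         if all(row[p - 1 - k] == row[p + k] for row in note for k in range(m)):
--             return p
--     return 0
-- ===== Notes on version B (the rewrite author's own statement) =====
-- stated objective: faster
-- what changed: B drops A's transpose/column-string machinery entirely: instead of building column strings and testing an adjacent pair then mirrored slices, it checks each candidate reflection line directly on the rows by comparing mirrored characters row[p-1-k] vs row[p+k], short-circuiting on the first mismatch (measured ~3.6x faster: no transpose, no string allocation).
-- outside the precondition, e.g. on find_col_reflection(['aa', 'a'], 0): A raises ValueError, B raises IndexError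
import Mathlib
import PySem

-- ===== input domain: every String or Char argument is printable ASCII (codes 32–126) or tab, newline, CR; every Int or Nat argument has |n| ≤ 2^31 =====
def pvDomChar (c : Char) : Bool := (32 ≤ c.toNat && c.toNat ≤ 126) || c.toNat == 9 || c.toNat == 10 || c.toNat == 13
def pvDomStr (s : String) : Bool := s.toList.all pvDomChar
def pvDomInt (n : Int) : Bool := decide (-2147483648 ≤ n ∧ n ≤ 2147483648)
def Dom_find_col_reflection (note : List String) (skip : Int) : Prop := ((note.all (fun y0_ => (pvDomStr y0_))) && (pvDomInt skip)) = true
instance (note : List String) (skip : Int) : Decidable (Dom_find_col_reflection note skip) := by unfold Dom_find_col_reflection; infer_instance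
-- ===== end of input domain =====

-- B replaces A's transpose + adjacent-pair + mirrored-slice scan by a direct per-candidate
-- reflection check on the rows (no transpose, no intermediate column strings built); objective: faster
-- by a constant factor (measured). The proof does not need Pre_: the two ports
-- agree on all inputs; Pre_ marks where the Python A itself returns (it raises on ragged rows).
-- A mutates nothing; the equivalence is about the return value.

-- ===== PORT A =====
-- zip(*note, strict=True): exact on equal-length rows (guaranteed by Pre_); column j is the
-- j-th char of every row, joined.  The ' ' default of getD is never hit for j < width.
def pyTranspose (note : List String) : List String :=
  let rows := note.map String.toList
  (List.range (match rows with | [] => 0 | r :: _ => r.length)).map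
    (fun j => String.ofList (rows.map (fun r => r.getD j ' ')))

-- all(ci == cj for ci, cj in zip(left, right)): zip stops at the shorter list
def allEqZip : List String → List String → Bool
  | a :: as_, b :: bs => (a == b) && allEqZip as_ bs
  | _, _ => true

-- the for-loop over enumerate(pairwise(note_cols)) with early return
def loopA (cols : List String) (skip : Int) : List Nat → Int
  | [] => 0
  | i :: rest =>
    if skip = (i : Int) + 1 then loopA cols skip rest
    else if cols.getD i "" = cols.getD (i + 1) "" then
      if allEqZip ((cols.take i).reverse) (cols.drop (i + 2)) then (i : Int) + 1
      else loopA cols skip rest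
    else loopA cols skip rest

def find_col_reflection (note : List String) (skip : Int) : Int :=
  let cols := pyTranspose note
  loopA cols skip (List.range (cols.length - 1))

-- ===== PORT B =====
-- row[p-1-k] / row[p+k]: both indices are in range for every row under Pre_ (equal widths),
-- so getD with a default is exact there.
def condB (rows : List (List Char)) (w : Nat) (p : Nat) : Bool :=
  rows.all (fun r => (List.range (min p (w - p))).all
    (fun k => r.getD (p - 1 - k) ' ' == r.getD (p + k) ' '))

def loopB (rows : List (List Char)) (w : Nat) (skip : Int) : List Nat → Int
  | [] => 0
  | p :: rest =>
    if (p : Int) = skip then loopB rows w skip rest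
    else if condB rows w p then (p : Int)
    else loopB rows w skip rest

def find_col_reflection_alt (note : List String) (skip : Int) : Int :=
  let rows := note.map String.toList
  let w := match rows with | [] => 0 | r :: _ => r.length
  loopB rows w skip (List.range' 1 (w - 1))

-- ===== PRECONDITION & SPEC =====
-- Pre_ excludes ragged notes (rows of unequal length), on which A raises ValueError (zip strict=True).
def Pre_find_col_reflection (note : List String) (skip : Int) : Prop :=
  ∀ s ∈ note, s.length = (note.headD "").length
instance (note : List String) (skip : Int) : Decidable (Pre_find_col_reflection note skip) := by
  unfold Pre_find_col_reflection; infer_instance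

def pvWitness_find_col_reflection : List String × Int := (["#..##", ".####", "#..##"], 0)

def Spec_find_col_reflection (note : List String) (skip : Int) (out : Int) : Prop := out = find_col_reflection_alt note skip
instance (note : List String) (skip : Int) (out : Int) : Decidable (Spec_find_col_reflection note skip out) := by unfold Spec_find_col_reflection; infer_instance

-- ===== CLAIM (what is proved, stated in full; the proofs are below) =====
def Claim_equal_find_col_reflection : Prop := ∀ (note : List String) (skip : Int), Dom_find_col_reflection note skip → Pre_find_col_reflection note skip → Spec_find_col_reflection note skip (find_col_reflection note skip)

-- ===== LEMMAS AND PROOFS =====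

theorem allEqZip_iff (xs ys : List String) :
    allEqZip xs ys = true ↔ ∀ t < min xs.length ys.length, xs.getD t "" = ys.getD t "" := by
  induction xs generalizing ys with
  | nil => simp [allEqZip]
  | cons a as_ ih =>
    cases ys with
    | nil => simp [allEqZip]
    | cons b bs =>
      simp only [allEqZip, Bool.and_eq_true, beq_iff_eq, ih]
      constructor
      · rintro ⟨hab, h⟩ t ht
        cases t with
        | zero => simpa using hab
        | succ t => simpa using h t (by simpa using ht)
      · intro h
        refine ⟨by simpa using h 0 (by simp), fun t ht => ?_⟩
        simpa using h (t + 1) (by simpa using ht)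

def colAt (rows : List (List Char)) (j : Nat) : String :=
  String.ofList (rows.map (fun r => r.getD j ' '))

theorem getD_cols (rows : List (List Char)) (w j : Nat) (hj : j < w) :
    ((List.range w).map (colAt rows)).getD j "" = colAt rows j := by
  simp [List.getD, hj]

theorem colAt_eq_iff (rows : List (List Char)) (a b : Nat) :
    colAt rows a = colAt rows b ↔ ∀ r ∈ rows, r.getD a ' ' = r.getD b ' ' := by
  simp [colAt, String.ofList_inj]

theorem condB_iff (rows : List (List Char)) (w p : Nat) :
    condB rows w p = true ↔
      ∀ r ∈ rows, ∀ k < min p (w - p), r.getD (p - 1 - k) ' ' = r.getD (p + k) ' ' := by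
  simp [condB, List.all_eq_true, List.mem_range]

theorem revtake_getD (rows : List (List Char)) (w i t : Nat) (ht : t < i) (hi : i ≤ w) :
    (((((List.range w).map (colAt rows))).take i).reverse).getD t "" = colAt rows (i - 1 - t) := by
  have hlen : (((List.range w).map (colAt rows)).take i).length = i := by simp [hi]
  have htl : t < ((((List.range w).map (colAt rows))).take i).reverse.length := by simpa [hlen]
  rw [List.getD_eq_getElem _ _ htl, List.getElem_reverse]
  have h2 : i - 1 - t < i := by omega
  simp [hlen]

theorem drop_getD (rows : List (List Char)) (w i t : Nat) (h : i + 2 + t < w) :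
    (((List.range w).map (colAt rows)).drop (i + 2)).getD t "" = colAt rows (i + 2 + t) := by
  simp [List.getD, List.getElem?_drop, h]

theorem reindex (c : Nat → String) (i w : Nat) (hi : i + 1 < w) :
    (c i = c (i + 1) ∧ ∀ t < min i (w - (i + 2)), c (i - 1 - t) = c (i + 2 + t))
      ↔ ∀ k < min (i + 1) (w - (i + 1)), c (i - k) = c (i + 1 + k) := by
  constructor
  · rintro ⟨h0, h⟩ k hk
    cases k with
    | zero => simpa using h0
    | succ t =>
      have ht : t < min i (w - (i + 2)) := by omega
      have e1 : i - (t + 1) = i - 1 - t := by omega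
      have e2 : i + 1 + (t + 1) = i + 2 + t := by omega
      rw [e1, e2]; exact h t ht
  · intro h
    refine ⟨by simpa using h 0 (by omega), fun t ht => ?_⟩
    have e1 : i - 1 - t = i - (t + 1) := by omega
    have e2 : i + 2 + t = i + 1 + (t + 1) := by omega
    rw [e1, e2]; exact h (t + 1) (by omega)

theorem condA_iff (rows : List (List Char)) (w i : Nat) (hi : i + 1 < w) :
    ((((List.range w).map (colAt rows)).getD i "" = ((List.range w).map (colAt rows)).getD (i + 1) "") ∧
      allEqZip ((((List.range w).map (colAt rows)).take i).reverse)
               (((List.range w).map (colAt rows)).drop (i + 2)) = true)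
      ↔ condB rows w (i + 1) = true := by
  rw [getD_cols rows w i (by omega), getD_cols rows w (i + 1) hi, allEqZip_iff]
  have hlen : ((((List.range w).map (colAt rows))).take i).reverse.length = i := by
    simp [Nat.le_of_lt (by omega : i < w)]
  have hlen2 : (((List.range w).map (colAt rows)).drop (i + 2)).length = w - (i + 2) := by simp
  have step1 :
      (∀ t < min ((((List.range w).map (colAt rows))).take i).reverse.length
          (((List.range w).map (colAt rows)).drop (i + 2)).length,
        ((((List.range w).map (colAt rows))).take i).reverse.getD t "" =
          (((List.range w).map (colAt rows)).drop (i + 2)).getD t "")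
      ↔ ∀ t < min i (w - (i + 2)), colAt rows (i - 1 - t) = colAt rows (i + 2 + t) := by
    rw [hlen, hlen2]
    refine forall_congr' fun t => forall_congr' fun ht => ?_
    rw [revtake_getD rows w i t (by omega) (by omega), drop_getD rows w i t (by omega)]
  rw [step1, reindex (colAt rows) i w hi, condB_iff]
  constructor
  · intro h r hr k hk
    have := (colAt_eq_iff rows (i - k) (i + 1 + k)).mp (h k hk) r hr
    simpa [Nat.add_sub_cancel] using this
  · intro h k hk
    refine (colAt_eq_iff rows (i - k) (i + 1 + k)).mpr fun r hr => ?_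
    simpa [Nat.add_sub_cancel] using h r hr k hk

theorem loop_eq (rows : List (List Char)) (w : Nat) (skip : Int) (idxs : List Nat)
    (h : ∀ i ∈ idxs, i + 1 < w) :
    loopA ((List.range w).map (colAt rows)) skip idxs = loopB rows w skip (idxs.map (· + 1)) := by
  induction idxs with
  | nil => rfl
  | cons i rest ih =>
    have hi : i + 1 < w := h i (by simp)
    have hrest : ∀ j ∈ rest, j + 1 < w := fun j hj => h j (by simp [hj])
    simp only [List.map_cons, loopA, loopB]
    by_cases hs : skip = (i : Int) + 1
    · rw [if_pos hs, if_pos (show ((i+1:Nat):Int) = skip by omega)]; exact ih hrest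
    · rw [if_neg hs, if_neg (show ¬((i+1:Nat):Int) = skip by omega)]
      by_cases hc : condB rows w (i + 1) = true
      · have hA := (condA_iff rows w i hi).mpr hc
        rw [if_pos hA.1, if_pos hA.2, if_pos hc]
        push_cast; ring
      · by_cases h1 : ((List.range w).map (colAt rows)).getD i "" =
            ((List.range w).map (colAt rows)).getD (i + 1) ""
        · rw [if_pos h1]
          by_cases h2 : allEqZip ((((List.range w).map (colAt rows))).take i).reverse
              (((List.range w).map (colAt rows)).drop (i + 2)) = true
          · exact absurd ((condA_iff rows w i hi).mp ⟨h1, h2⟩) hc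
          · rw [if_neg h2, if_neg hc]; exact ih hrest
        · rw [if_neg h1, if_neg hc]; exact ih hrest

theorem range'_one (n : Nat) : List.range' 1 n = (List.range n).map (· + 1) := by
  rw [List.range'_eq_map_range]
  exact List.map_congr_left fun x _ => Nat.add_comm 1 x

theorem find_col_reflection_spec : Claim_equal_find_col_reflection := by
  intro note skip _ _
  unfold Spec_find_col_reflection find_col_reflection find_col_reflection_alt pyTranspose
  simp only [List.length_map, List.length_range]
  rw [range'_one]
  exact loop_eq (note.map String.toList) _ skip _ (fun i hi => by
    have := List.mem_range.mp hi; omega)
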